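-- pv_equiv track=rewrite | github.com/DSXiangLi/Leetcode_python- | level1.py | answer2
-- ===== SOURCE A (Python) =====
-- def answer2(mystr):
--     count = 1
--     val_count = dict()
--     for i in range(len(mystr)):
--         if(mystr[i] in val_count.keys()):
--             val_count[mystr[i]] +=1
--         else:
--             val_count[mystr[i]] = 1
--
--     for gr in range(1, int(len(mystr)/2+1)):
--         if (len(mystr)%gr == 0 & sum([count % gr for count in val_count.values()])==0):
--             flag =True
--             for i in range(gr,len(mystr)):
--                 if mystr[i%gr] != mystr[i]:
--                     flag = False
--                     break
--             if flag:
--                 count = int(len(mystr)/gr)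
--                 break
--     return count
-- ===== SOURCE B (Python) =====
-- def answer2(mystr):
--     n = len(mystr)
--     if n == 0:
--         return 1
--     # smallest cyclic shift fixing mystr = first occurrence of mystr inside
--     # mystr+mystr at index >= 1; it always divides n, and n // it is the answer
--     return n // (mystr + mystr).find(mystr, 1)
-- ===== Notes on version B (the rewrite author's own statement) =====
-- stated objective: faster
-- what changed: B replaces A's scan over candidate divisors (each checked by an O(n) character comparison) with the classic string-doubling trick: a single substring search of mystr inside mystr+mystr starting at index 1 gives the smallest self-rotation, which always divides n, and n divided by it is the answer.
import Mathlib
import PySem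

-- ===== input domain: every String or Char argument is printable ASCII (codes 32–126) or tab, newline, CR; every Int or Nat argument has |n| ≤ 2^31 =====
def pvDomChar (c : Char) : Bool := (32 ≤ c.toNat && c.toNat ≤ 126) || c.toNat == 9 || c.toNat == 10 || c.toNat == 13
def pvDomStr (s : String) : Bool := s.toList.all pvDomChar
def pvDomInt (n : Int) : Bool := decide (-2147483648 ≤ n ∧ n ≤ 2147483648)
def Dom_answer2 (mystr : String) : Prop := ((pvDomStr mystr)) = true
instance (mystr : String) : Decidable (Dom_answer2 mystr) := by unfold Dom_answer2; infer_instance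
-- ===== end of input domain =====

-- B replaces A's divisor scan (each candidate checked character by character) with the string-doubling
-- trick: the first occurrence of mystr inside mystr+mystr at index ≥ 1 is the smallest self-rotation,
-- it divides len(mystr), and len(mystr) divided by it is the answer.

-- ===== PORT A =====
-- inner loop: `for i in range(gr, len(mystr)): if mystr[i%gr] != mystr[i]: flag = False; break`
def aFlag (cs : List Char) (gr : Nat) : List Nat → Bool
  | [] => true
  | i :: rest => if cs.getD (i % gr) ' ' ≠ cs.getD i ' ' then false else aFlag cs gr rest

-- outer loop with its break; `0 & sum(...)` is ported literally via PySem.Int.band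
def aLoop (cs : List Char) (vals : List Int) (n : Nat) : List Nat → Int
  | [] => 1
  | gr :: rest =>
    let S : Int := (vals.map (fun count => PySem.Int.mod count (gr : Int))).sum
    if ((PySem.Int.mod (n : Int) (gr : Int) == PySem.Int.band 0 S) && (PySem.Int.band 0 S == 0)) then
      if aFlag cs gr (List.range' gr (n - gr)) then ((n / gr : Nat) : Int)
      else aLoop cs vals n rest
    else aLoop cs vals n rest

def answer2 (mystr : String) : Int :=
  let cs := mystr.toList
  let n := cs.length
  let val_count : PySem.Dict Char Int := cs.foldl
    (fun d c => if (PySem.Dict.get? d c).isSome then PySem.Dict.modify d c 0 (· + 1)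
                else PySem.Dict.insert d c 1) PySem.Dict.empty
  aLoop cs (PySem.Dict.values val_count) n (List.range' 1 (n / 2))

-- ===== PORT B =====
def answer2_alt (mystr : String) : Int :=
  let cs := mystr.toList
  let n := cs.length
  if n == 0 then 1
  else PySem.Int.floordiv (n : Int) (PySem.Chars.findFrom (cs ++ cs) cs 1 none)

-- ===== PRECONDITION & SPEC =====
def Spec_answer2 (mystr : String) (out : Int) : Prop := out = answer2_alt mystr
instance (mystr : String) (out : Int) : Decidable (Spec_answer2 mystr out) := by unfold Spec_answer2; infer_instance

-- ===== CLAIM (what is proved, stated in full; the proofs are below) =====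
def Claim_equal_answer2 : Prop := ∀ (mystr : String), Dom_answer2 mystr → Spec_answer2 mystr (answer2 mystr)

-- ===== LEMMAS AND PROOFS =====

-- A's arithmetic condition is just divisibility: `0 & S = 0` and `n % gr == 0`.
lemma cond_arith (n gr : Nat) (S : Int) :
    ((PySem.Int.mod (n : Int) (gr : Int) == PySem.Int.band 0 S) && (PySem.Int.band 0 S == 0))
      = (n % gr == 0) := by
  simp [pysem, Int.natCast_dvd_natCast, Nat.dvd_iff_mod_eq_zero]

-- aFlag is an `all` over its index list
lemma aFlag_iff (cs : List Char) (gr : Nat) (l : List Nat) :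
    aFlag cs gr l = true ↔ ∀ i ∈ l, cs.getD (i % gr) ' ' = cs.getD i ' ' := by
  induction l with
  | nil => simp [aFlag]
  | cons i rest ih =>
    rw [show aFlag cs gr (i :: rest) = if cs.getD (i % gr) ' ' ≠ cs.getD i ' ' then false else aFlag cs gr rest from rfl]
    by_cases h : cs.getD (i % gr) ' ' = cs.getD i ' '
    · rw [if_neg (by simpa using h)]
      simp only [List.mem_cons, ih]
      constructor
      · rintro hr j (rfl | hj); exact h; exact hr j hj
      · intro hr j hj; exact hr j (Or.inr hj)
    · rw [if_pos h]
      simp only [List.mem_cons]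
      constructor
      · intro hf; exact absurd hf (by simp)
      · intro hr; exact absurd (hr i (Or.inl rfl)) h

-- modular scan ↔ one-step shift
lemma shift_iff (cs : List Char) (gr : Nat) (h1 : 1 ≤ gr) :
    (∀ i, gr ≤ i → i < cs.length → cs.getD (i % gr) ' ' = cs.getD i ' ') ↔
    (∀ i, gr ≤ i → i < cs.length → cs.getD (i - gr) ' ' = cs.getD i ' ') := by
  have key : ∀ i, gr ≤ i → i < gr + gr → i % gr = i - gr := by
    intro i h2 h3
    calc i % gr = ((i - gr) + gr) % gr := by rw [Nat.sub_add_cancel h2]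
      _ = (i - gr) % gr := Nat.add_mod_right _ _
      _ = i - gr := Nat.mod_eq_of_lt (by omega)
  constructor
  · intro h i hgi hin
    by_cases h2 : i < gr + gr
    · rw [← key i hgi h2]; exact h i hgi hin
    · have ha := h (i - gr) (by omega) (by omega)
      have hb := h i hgi hin
      have hm : (i - gr) % gr = i % gr := by
        conv_rhs => rw [show i = (i - gr) + gr by omega, Nat.add_mod_right]
      rw [hm] at ha
      exact ha.symm.trans hb
  · intro h i
    induction i using Nat.strong_induction_on with
    | _ i ih =>
      intro hgi hin
      have hb := h i hgi hin
      by_cases h2 : i < gr + gr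
      · rw [key i hgi h2]; exact hb
      · have hm : i % gr = (i - gr) % gr := by
          conv_lhs => rw [show i = (i - gr) + gr by omega, Nat.add_mod_right]
        rw [hm]
        exact (ih (i - gr) (by omega) (by omega) (by omega)).trans hb

-- one-step shift ↔ slice equality
lemma shift_eq_slices (cs : List Char) (gr : Nat) (hn : gr ≤ cs.length) :
    (∀ i, gr ≤ i → i < cs.length → cs.getD (i - gr) ' ' = cs.getD i ' ') ↔
    cs.drop gr = cs.take (cs.length - gr) := by
  constructor
  · intro h
    apply List.ext_getElem
    · simp
    · intro j h1 h2
      have hj : j < cs.length - gr := by simpa using h1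
      have := h (gr + j) (Nat.le_add_right _ _) (by omega)
      rw [List.getD_eq_getElem cs ' ' (by omega : gr + j - gr < cs.length)] at this
      rw [List.getD_eq_getElem cs ' ' (by omega : gr + j < cs.length)] at this
      simpa [Nat.add_sub_cancel_left] using this.symm
  · intro h i hgi hin
    have hd : (cs.drop gr)[i - gr]'(by simp; omega) = (cs.take (cs.length - gr))[i - gr]'(by simp; omega) := by
      congr 1
    rw [List.getElem_drop, List.getElem_take] at hd
    rw [List.getD_eq_getElem cs ' ' (by omega : i - gr < cs.length),
        List.getD_eq_getElem cs ' ' hin]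
    simp only [Nat.add_sub_cancel' hgi] at hd
    exact hd.symm

lemma flag_eq_slices (cs : List Char) (gr : Nat) (h1 : 1 ≤ gr) :
    aFlag cs gr (List.range' gr (cs.length - gr)) = (cs.drop gr == cs.take (cs.length - gr)) := by
  by_cases hn : gr ≤ cs.length
  · rw [Bool.eq_iff_iff, aFlag_iff, beq_iff_eq,
        ← shift_eq_slices cs gr hn, ← shift_iff cs gr h1]
    constructor
    · intro h' i ha hb
      exact h' i (List.mem_range'_1.mpr ⟨ha, by omega⟩)
    · intro h' i hi
      obtain ⟨ha, hb⟩ := List.mem_range'_1.mp hi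
      exact h' i ha (by omega)
  · have hr : cs.length - gr = 0 := by omega
    have hn' : cs.length ≤ gr := by omega
    simp [hr, aFlag, List.drop_eq_nil_of_le hn']

lemma loop_eq (cs : List Char) (vals : List Int) (l : List Nat) (hl : ∀ gr ∈ l, 1 ≤ gr) :
    aLoop cs vals cs.length l =
      match l.find? (fun gr => cs.length % gr == 0 && cs.drop gr == cs.take (cs.length - gr)) with
      | some gr => ((cs.length / gr : Nat) : Int)
      | none => 1 := by
  induction l with
  | nil => simp [aLoop]
  | cons gr rest ih =>
    have h1 : 1 ≤ gr := hl gr (by simp)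
    have ih' := ih (fun g hg => hl g (by simp [hg]))
    simp only [aLoop, List.find?_cons, cond_arith, flag_eq_slices cs gr h1]
    by_cases hc : (cs.length % gr == 0) = true <;>
      by_cases hf : (cs.drop gr == cs.take (cs.length - gr)) = true <;>
        simp [hc, hf, ih']

-- slice equality ↔ rotation fixed point, for a divisor of the length
lemma slices_iff_rotate (cs : List Char) (gr : Nat) (h1 : 1 ≤ gr) (hle : gr ≤ cs.length)
    (hdvd : gr ∣ cs.length) :
    cs.drop gr = cs.take (cs.length - gr) ↔ cs.rotate gr = cs := by
  constructor
  · intro hsl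
    have hshift := (shift_eq_slices cs gr hle).mpr hsl
    have hmod := (shift_iff cs gr h1).mpr hshift
    have hmodall : ∀ i, i < cs.length → cs.getD (i % gr) ' ' = cs.getD i ' ' := by
      intro i hi
      by_cases h : gr ≤ i
      · exact hmod i h hi
      · rw [Nat.mod_eq_of_lt (by omega)]
    apply List.ext_getElem (by simp)
    intro j hj1 hj2
    have hn0 : 0 < cs.length := by omega
    rw [List.getElem_rotate]
    have e1 := hmodall ((j + gr) % cs.length) (Nat.mod_lt _ hn0)
    have e2 := hmodall j hj2
    rw [show ((j + gr) % cs.length) % gr = j % gr by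
          rw [Nat.mod_mod_of_dvd _ hdvd, Nat.add_mod_right]] at e1
    have e3 := e1.symm.trans e2
    rw [List.getD_eq_getElem _ _ (Nat.mod_lt _ hn0), List.getD_eq_getElem _ _ hj2] at e3
    exact e3
  · intro hrot
    have h := List.rotate_eq_drop_append_take hle
    rw [hrot] at h
    have h2 := congrArg (List.take (cs.length - gr)) h
    rw [List.take_append, List.length_drop, Nat.sub_self, List.take_zero, List.append_nil,
        List.take_of_length_le (l := cs.drop gr) (by rw [List.length_drop])] at h2
    exact h2.symm

-- prefix of the doubled string ↔ rotation fixed point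
lemma prefix_iff_rotate (cs : List Char) (i : Nat) (hle : i ≤ cs.length) :
    cs <+: (cs ++ cs).drop i ↔ cs.rotate i = cs := by
  rw [List.rotate_eq_drop_append_take hle, List.drop_append_of_le_length hle,
      List.prefix_iff_eq_take, List.take_append,
      List.take_of_length_le (by rw [List.length_drop]; omega), List.length_drop,
      show cs.length - (cs.length - i) = i by omega]
  exact eq_comm

-- the minimal positive fixing rotation divides any fixing rotation
lemma min_rot_dvd (cs : List Char) (H : ∃ m, 0 < m ∧ cs.rotate m = cs) (m : Nat)
    (hm : cs.rotate m = cs) : Nat.find H ∣ m := by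
  set d := Nat.find H with hd
  obtain ⟨hd0, hdrot⟩ := Nat.find_spec H
  have hmult : ∀ k, cs.rotate (k * d) = cs := by
    intro k
    induction k with
    | zero => simp
    | succ k ih => rw [Nat.succ_mul, ← List.rotate_rotate, ih, hdrot]
  have hr : cs.rotate (m % d) = cs := by
    have h2 : cs.rotate (m / d * d + m % d) = cs.rotate (m % d) := by
      rw [← List.rotate_rotate, hmult]
    rw [← h2, show m / d * d + m % d = m from by rw [Nat.mul_comm]; exact Nat.div_add_mod m d]
    exact hm
  rcases Nat.eq_zero_or_pos (m % d) with h0 | hpos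
  · exact Nat.dvd_of_mod_eq_zero h0
  · have hm1 := Nat.find_min' H ⟨hpos, hr⟩
    have hm2 : m % d < d := Nat.mod_lt _ hd0
    omega

lemma find?_range'_least (p : Nat → Bool) (a k d : Nat) (h1 : a ≤ d) (h2 : d < a + k)
    (hp : p d = true) (hmin : ∀ j, a ≤ j → j < d → p j = false) :
    (List.range' a k).find? p = some d := by
  induction k generalizing a with
  | zero => omega
  | succ k ih =>
    rw [List.range'_succ, List.find?_cons]
    rcases Nat.eq_or_lt_of_le h1 with rfl | hlt
    · simp [hp]
    · rw [hmin a le_rfl hlt]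
      exact ih (a + 1) hlt (by omega) (fun j hj => hmin j (by omega))

-- ===== VERDICT (by name: the statement is the Claim_ definition above) =====
theorem answer2_spec : Claim_equal_answer2 := by
  intro mystr _
  unfold Spec_answer2 answer2 answer2_alt
  simp only []
  set cs := mystr.toList with hcs
  rw [loop_eq cs _ _ (fun g hg => (List.mem_range'_1.mp hg).1)]
  by_cases hn : cs.length = 0
  · simp [hn]
  · have hn1 : 1 ≤ cs.length := by omega
    rw [if_neg (by simpa using hn)]
    rw [show (1 : Int) = ((1 : Nat) : Int) from by norm_num]
    have H : ∃ m, 0 < m ∧ cs.rotate m = cs := ⟨cs.length, hn1, List.rotate_length cs⟩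
    set d := Nat.find H with hdef
    obtain ⟨hd0, hdrot⟩ := Nat.find_spec H
    have hdn : d ≤ cs.length := Nat.find_min' H ⟨hn1, List.rotate_length cs⟩
    have hdvd : d ∣ cs.length := min_rot_dvd cs H _ (List.rotate_length cs)
    -- B side: the doubled-string search finds exactly d
    have hk1 : 1 ≤ (cs ++ cs).length := by simp; omega
    have hinf : cs <:+: (cs ++ cs).drop 1 := by
      rw [List.drop_append_of_le_length hn1]
      exact (List.suffix_append _ _).isInfix
    have hne : PySem.Chars.findFrom (cs ++ cs) cs ((1 : Nat) : Int) ≠ -1 := by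
      rw [Ne, PySem.Chars.findFrom_natCast_eq_neg_one_iff (cs ++ cs) cs 1 hk1]
      exact not_not_intro hinf
    obtain ⟨hge, hpre, hmin⟩ := PySem.Chars.findFrom_natCast_spec (cs ++ cs) cs 1 hk1 hne
    set r := (PySem.Chars.findFrom (cs ++ cs) cs ((1 : Nat) : Int)).toNat with hrdef
    have hr_le : r ≤ cs.length := by
      by_contra hlt
      exact hmin cs.length hn1 (by omega)
        (by rw [List.drop_left])
    have hr1 : 1 ≤ r := by
      have h0 : ((1 : Nat) : Int) ≤ PySem.Chars.findFrom (cs ++ cs) cs ((1 : Nat) : Int) := hge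
      omega
    have hrot_r : cs.rotate r = cs := (prefix_iff_rotate cs r hr_le).mp hpre
    have hd_le : d ≤ r := Nat.find_min' H ⟨by omega, hrot_r⟩
    have hr_eq : r = d := by
      by_contra hne'
      exact hmin d (by omega) (by omega) ((prefix_iff_rotate cs d hdn).mpr hdrot)
    have hBfind : PySem.Chars.findFrom (cs ++ cs) cs ((1 : Nat) : Int) = (d : Int) := by
      omega
    rw [hBfind, PySem.Int.floordiv_natCast]
    -- A side: the predicate holds exactly at multiples of d
    have hQ : ∀ gr, 1 ≤ gr → gr ≤ cs.length →
        ((cs.length % gr == 0 && cs.drop gr == cs.take (cs.length - gr)) = true ↔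
          (gr ∣ cs.length ∧ cs.rotate gr = cs)) := by
      intro gr hg1 hgle
      rw [Bool.and_eq_true, beq_iff_eq, beq_iff_eq, Nat.dvd_iff_mod_eq_zero]
      constructor
      · rintro ⟨hm, hs⟩
        exact ⟨hm, (slices_iff_rotate cs gr hg1 hgle (Nat.dvd_of_mod_eq_zero hm)).mp hs⟩
      · rintro ⟨hm, hs⟩
        exact ⟨hm, (slices_iff_rotate cs gr hg1 hgle (Nat.dvd_of_mod_eq_zero hm)).mpr hs⟩
    by_cases hdlt : d < cs.length
    · have h2d : 2 * d ≤ cs.length := by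
        obtain ⟨k, hk⟩ := hdvd
        rcases Nat.lt_or_ge k 2 with hk2 | hk2
        · interval_cases k <;> omega
        · nlinarith
      have hfind : (List.range' 1 (cs.length / 2)).find?
          (fun gr => cs.length % gr == 0 && cs.drop gr == cs.take (cs.length - gr)) = some d := by
        apply find?_range'_least _ _ _ _ (by omega) (by omega)
        · exact (hQ d (by omega) hdn).mpr ⟨hdvd, hdrot⟩
        · intro j hj1 hjd
          rw [Bool.eq_false_iff]
          intro hQj
          have := (hQ j hj1 (by omega)).mp hQj
          exact absurd (Nat.find_min' H ⟨by omega, this.2⟩) (by omega)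
      rw [hfind]
    · have hd_eq : d = cs.length := by omega
      have hfind : (List.range' 1 (cs.length / 2)).find?
          (fun gr => cs.length % gr == 0 && cs.drop gr == cs.take (cs.length - gr)) = none := by
        rw [List.find?_eq_none]
        intro j hj
        obtain ⟨hj1, hj2⟩ := List.mem_range'_1.mp hj
        intro hQj
        have hjle : j ≤ cs.length := by omega
        have := (hQ j hj1 hjle).mp hQj
        have := Nat.find_min' H ⟨by omega, this.2⟩
        omega
      rw [hfind, hd_eq, Nat.div_self (by omega)]
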